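-- pv_equiv track=rewrite | github.com/OrlandoWhite88/uni_training | grpo_tinker_orlando.py | extract_last_json
-- ===== SOURCE A (Python) =====
-- from typing import Any, Dict, List, Optional
--
-- def extract_last_json(text: Any) -> Optional[str]:
--     """
--     Extract the last JSON object (by braces) from a text string.
--
--     - Non-string input -> None.
--     - No '{' found or unmatched braces -> None.
--     - Otherwise returns the substring from last '{' to its matching '}'.
--     """
--     if not isinstance(text, str):
--         return None
--
--     last_open = text.rfind("{")
--     if last_open == -1:
--         return None
--
--     brace_count = 0
--     for i in range(last_open, len(text)):
--         char = text[i]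
--         if char == "{":
--             brace_count += 1
--         elif char == "}":
--             brace_count -= 1
--             if brace_count == 0:
--                 return text[last_open : i + 1]
--
--     return None
-- ===== SOURCE B (Python) =====
-- from typing import Any, Optional
--
--
-- def extract_last_json(text: Any) -> Optional[str]:
--     if not isinstance(text, str):
--         return None
--     last_open = text.rfind("{")
--     if last_open == -1:
--         return None
--     close = text.find("}", last_open)
--     if close == -1:
--         return None
--     return text[last_open : close + 1]
-- ===== Notes on version B (the rewrite author's own statement) =====
-- stated objective: simpler
-- what changed: Replaces A's character-scanning loop with a brace counter by a single str.find call starting at last_open: rfind guarantees no opening brace occurs later, so A's counter never exceeds 1 and A stops exactly at the first following closing brace, which find locates directly.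
import Mathlib
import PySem

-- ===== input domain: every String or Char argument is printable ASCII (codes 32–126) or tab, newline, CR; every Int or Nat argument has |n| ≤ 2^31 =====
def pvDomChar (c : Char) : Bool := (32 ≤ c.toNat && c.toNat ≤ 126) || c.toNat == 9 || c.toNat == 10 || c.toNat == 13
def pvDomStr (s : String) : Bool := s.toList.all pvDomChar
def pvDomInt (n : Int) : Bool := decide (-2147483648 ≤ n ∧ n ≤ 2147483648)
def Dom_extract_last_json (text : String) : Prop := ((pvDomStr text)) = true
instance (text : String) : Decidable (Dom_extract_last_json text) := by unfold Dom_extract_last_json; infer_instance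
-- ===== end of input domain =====

-- B replaces A's brace-counting scan by rfind + find('}', last_open); same return value, proved below.

-- ===== PORT A =====
-- the 'for i in range(last_open, len(text))' loop with the brace counter and early return
def pvLoopA (s : List Char) (lo : Nat) (i : Nat) (cnt : Int) : Option String :=
  if h : i < s.length then
    -- char = text[i] (index valid: last_open ≤ i < len)
    if s[i] = '{' then pvLoopA s lo (i + 1) (cnt + 1)
    else if s[i] = '}' then
      if cnt - 1 = 0 then some (String.ofList (PySem.Chars.slice s (some (lo : Int)) (some ((i : Int) + 1))))
      else pvLoopA s lo (i + 1) (cnt - 1)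
    else pvLoopA s lo (i + 1) cnt
  else none
termination_by s.length - i

def extract_last_json (text : String) : Option String :=
  -- isinstance(text, str) is always true under the type convention (text : String)
  let lastOpen := PySem.Str.rfind text "{"
  if lastOpen = -1 then none
  else pvLoopA text.toList lastOpen.toNat lastOpen.toNat 0

-- ===== PORT B =====
def extract_last_json_alt (text : String) : Option String :=
  let lastOpen := PySem.Str.rfind text "{"
  if lastOpen = -1 then none
  else
    let close := PySem.Str.findFrom text "}" lastOpen
    if close = -1 then none
    else some (PySem.Str.slice text (some lastOpen) (some (close + 1)))

-- ===== PRECONDITION & SPEC =====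
def Spec_extract_last_json (text : String) (out : Option String) : Prop := out = extract_last_json_alt text
instance (text : String) (out : Option String) : Decidable (Spec_extract_last_json text out) := by unfold Spec_extract_last_json; infer_instance

-- ===== CLAIM (what is proved, stated in full; the proofs are below) =====
def Claim_equal_extract_last_json : Prop := ∀ (text : String), Dom_extract_last_json text → Spec_extract_last_json text (extract_last_json text)

-- ===== LEMMAS AND PROOFS =====

lemma pv_isPrefixOf_single (d : Char) (l : List Char) :
    ([d].isPrefixOf l = true) ↔ l.head? = some d := by
  cases l with
  | nil => simp [List.isPrefixOf]
  | cons c t => simp only [List.isPrefixOf, List.head?_cons, Option.some.injEq,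
      Bool.and_eq_true, and_true, beq_iff_eq]; exact eq_comm

lemma pv_findgo_shift (d : Char) : ∀ (t : List Char) (k : Nat),
    PySem.Chars.find.go [d] t k =
      if PySem.Chars.find.go [d] t 0 = -1 then -1 else (k : Int) + PySem.Chars.find.go [d] t 0 := by
  intro t
  induction t with
  | nil => intro k; simp [PySem.Chars.find.go]
  | cons c t ih =>
    intro k
    have hunf : ∀ k' : Nat, PySem.Chars.find.go [d] (c :: t) k' =
        if [d].isPrefixOf (c :: t) = true then (k' : Int) else PySem.Chars.find.go [d] t (k' + 1) := by
      intro k'; rw [PySem.Chars.find.go]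
    rw [hunf k, hunf 0]
    by_cases hp : [d].isPrefixOf (c :: t) = true
    · simp [hp]
    · simp only [hp]
      rw [ih (k + 1), ih 1]
      have hge : -1 ≤ PySem.Chars.find.go [d] t 0 := by
        have := PySem.Chars.neg_one_le_find t [d]
        simpa [PySem.Chars.find] using this
      split_ifs with h1 h2 h3 <;> push_cast <;> omega

lemma pv_find_cons (d c : Char) (t : List Char) :
    PySem.Chars.find (c :: t) [d] =
      if c = d then 0
      else if PySem.Chars.find t [d] = -1 then -1 else 1 + PySem.Chars.find t [d] := by
  have hunf : PySem.Chars.find.go [d] (c :: t) 0 =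
      if [d].isPrefixOf (c :: t) = true then ((0 : Nat) : Int) else PySem.Chars.find.go [d] t (0 + 1) := by
    rw [PySem.Chars.find.go]
  rw [PySem.Chars.find, hunf]
  by_cases hcd : c = d
  · have hp : [d].isPrefixOf (c :: t) = true :=
      (pv_isPrefixOf_single d _).mpr (by rw [List.head?_cons, hcd])
    rw [if_pos hp, if_pos hcd]
    rfl
  · have hp : ¬ ([d].isPrefixOf (c :: t) = true) := by
      rw [pv_isPrefixOf_single, List.head?_cons]
      simp only [Option.some.injEq]
      exact hcd
    rw [if_neg hp, if_neg hcd]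
    rw [pv_findgo_shift d t 1]
    simp [PySem.Chars.find]

lemma pv_find_nil (d : Char) : PySem.Chars.find [] [d] = -1 := by
  simp [PySem.Chars.find, PySem.Chars.find.go]

lemma pv_rfind_go_spec (s : List Char) (d : Char) : ∀ (j : Nat),
    (PySem.Chars.rfind.go s [d] j = -1 ∧ ∀ i : Nat, i ≤ j → s[i]? ≠ some d) ∨
    (∃ m : Nat, PySem.Chars.rfind.go s [d] j = (m : Int) ∧ m ≤ j ∧ s[m]? = some d ∧
      ∀ i : Nat, m < i → i ≤ j → s[i]? ≠ some d) := by
  intro j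
  induction j with
  | zero =>
    rw [PySem.Chars.rfind.go]
    by_cases h : [d].isPrefixOf s = true
    · right
      refine ⟨0, by simp [h], le_refl 0, ?_, ?_⟩
      · have := (pv_isPrefixOf_single d s).mp h
        simpa [← List.head?_drop, List.drop_zero] using this
      · intro i h1 h2; omega
    · left
      refine ⟨by simp [h], ?_⟩
      intro i hi
      interval_cases i
      intro hc
      exact h ((pv_isPrefixOf_single d s).mpr (by simpa [← List.head?_drop, List.drop_zero] using hc))
  | succ j ih =>
    rw [PySem.Chars.rfind.go]
    by_cases h : [d].isPrefixOf (s.drop (j + 1)) = true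
    · right
      refine ⟨j + 1, by simp [h], le_refl _, ?_, ?_⟩
      · have := (pv_isPrefixOf_single d _).mp h
        simpa [← List.head?_drop] using this
      · intro i h1 h2; omega
    · have hnot : s[j + 1]? ≠ some d := by
        intro hc
        exact h ((pv_isPrefixOf_single d _).mpr (by simpa [← List.head?_drop] using hc))
      rcases ih with ⟨he, hall⟩ | ⟨m, he, hm, hget, hall⟩
      · left
        refine ⟨by simp [h, he], ?_⟩
        intro i hi
        rcases Nat.lt_or_ge i (j + 1) with h' | h'
        · exact hall i (by omega)
        · have : i = j + 1 := by omega
          subst this; exact hnot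
      · right
        refine ⟨m, by simp [h, he], by omega, hget, ?_⟩
        intro i h1 h2
        rcases Nat.lt_or_ge i (j + 1) with h' | h'
        · exact hall i h1 (by omega)
        · have : i = j + 1 := by omega
          subst this; exact hnot

lemma pv_rfind_spec (s : List Char) (d : Char) :
    (PySem.Chars.rfind s [d] = -1 ∧ ∀ i : Nat, s[i]? ≠ some d) ∨
    (∃ m : Nat, PySem.Chars.rfind s [d] = (m : Int) ∧ m < s.length ∧ s[m]? = some d ∧
      ∀ i : Nat, m < i → s[i]? ≠ some d) := by
  rcases pv_rfind_go_spec s d s.length with ⟨he, hall⟩ | ⟨m, he, hm, hget, hall⟩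
  · left
    refine ⟨by simpa [PySem.Chars.rfind] using he, ?_⟩
    intro i
    rcases Nat.lt_or_ge i s.length with h | h
    · exact hall i (by omega)
    · simp [List.getElem?_eq_none h]
  · right
    have hmlt : m < s.length := by
      by_contra hc
      rw [List.getElem?_eq_none (by omega)] at hget
      simp at hget
    refine ⟨m, by simpa [PySem.Chars.rfind] using he, hmlt, hget, ?_⟩
    intro i h1
    rcases Nat.lt_or_ge i s.length with h | h
    · exact hall i h1 (by omega)
    · simp [List.getElem?_eq_none h]

-- A's loop, started with count 1 on a region containing no '{', returns the slice up to the first '}' there.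
lemma pv_loopA_eq : ∀ (n : Nat) (s : List Char) (lo i : Nat), s.length - i ≤ n →
    (∀ j : Nat, i ≤ j → s[j]? ≠ some '{') →
    pvLoopA s lo i 1 =
      (if PySem.Chars.find (s.drop i) ['}'] = -1 then none
       else some (String.ofList (PySem.Chars.slice s (some (lo : Int))
         (some ((i : Int) + PySem.Chars.find (s.drop i) ['}'] + 1))))) := by
  intro n
  induction n with
  | zero =>
    intro s lo i hn _
    have hge : s.length ≤ i := by omega
    rw [pvLoopA]
    simp [Nat.not_lt.mpr hge, List.drop_eq_nil_of_le hge, pv_find_nil]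
  | succ n ih =>
    intro s lo i hn h1
    by_cases h : i < s.length
    · have hdrop : s.drop i = s[i] :: s.drop (i + 1) := List.drop_eq_getElem_cons h
      have hne : s[i] ≠ '{' := by
        intro hc
        exact h1 i (le_refl i) (by simp [List.getElem?_eq_getElem h, hc])
      rw [pvLoopA]
      simp only [h, dif_pos]
      by_cases hcl : s[i] = '}'
      · have hf : PySem.Chars.find (s.drop i) ['}'] = 0 := by
          rw [hdrop, pv_find_cons]; simp [hcl]
        rw [if_neg hne, if_pos hcl, if_pos (by norm_num : (1 : Int) - 1 = 0), hf,
          if_neg (by norm_num : ¬ ((0 : Int) = -1))]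
        norm_num
      · have hrec : pvLoopA s lo (i + 1) 1 =
            (if PySem.Chars.find (s.drop (i + 1)) ['}'] = -1 then none
             else some (String.ofList (PySem.Chars.slice s (some (lo : Int))
               (some (((i + 1 : Nat) : Int) + PySem.Chars.find (s.drop (i + 1)) ['}'] + 1))))) :=
          ih s lo (i + 1) (by omega) (fun j hj => h1 j (by omega))
        have hf : PySem.Chars.find (s.drop i) ['}'] =
            if PySem.Chars.find (s.drop (i + 1)) ['}'] = -1 then -1
            else 1 + PySem.Chars.find (s.drop (i + 1)) ['}'] := by
          rw [hdrop, pv_find_cons]; simp [hcl]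
        have hge : -1 ≤ PySem.Chars.find (s.drop (i + 1)) ['}'] :=
          PySem.Chars.neg_one_le_find _ _
        rw [if_neg hne, if_neg hcl, hrec, hf]
        split_ifs with h2 h3 h4
        · rfl
        · omega
        · omega
        · congr 3
          push_cast
          ring
    · have hge : s.length ≤ i := by omega
      rw [pvLoopA]
      simp [Nat.not_lt.mpr hge, List.drop_eq_nil_of_le hge, pv_find_nil]

-- ===== VERDICT (by name: the statement is the Claim_ definition above) =====
theorem extract_last_json_spec : Claim_equal_extract_last_json := by
  intro text _
  unfold Spec_extract_last_json extract_last_json extract_last_json_alt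
  simp only [PySem.Str.rfind_eq, PySem.Str.findFrom_eq]
  have htl : ("{" : String).toList = ['{'] := rfl
  have htr : ("}" : String).toList = ['}'] := rfl
  rw [htl, htr]
  rcases pv_rfind_spec text.toList '{' with ⟨he, _⟩ | ⟨m, he, hmlt, hget, hall⟩
  · simp [he]
  · have hne : PySem.Chars.rfind text.toList ['{'] ≠ -1 := by rw [he]; omega
    simp only [he, Int.toNat_natCast]
    rw [if_neg (by omega : ¬ ((m : Int) = -1))]
    -- A's first iteration reads the '{' at m and recurses with count 1
    have hgetm : text.toList[m] = '{' := by
      have := List.getElem?_eq_getElem hmlt (l := text.toList)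
      rw [this] at hget; exact Option.some.inj hget
    have hstep : pvLoopA text.toList m m 0 = pvLoopA text.toList m (m + 1) 1 := by
      rw [pvLoopA, dif_pos hmlt, if_pos hgetm]
      norm_num
    rw [hstep, pv_loopA_eq (text.toList.length - (m + 1)) text.toList m (m + 1) (le_refl _)
      (fun j hj => hall j (by omega))]
    have hge : -1 ≤ PySem.Chars.find (text.toList.drop (m + 1)) ['}'] :=
      PySem.Chars.neg_one_le_find _ _
    have hdrop : text.toList.drop m = text.toList[m] :: text.toList.drop (m + 1) :=
      List.drop_eq_getElem_cons hmlt
    -- B's find from m skips the '{' at m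
    have hfm : PySem.Chars.find (text.toList.drop m) ['}'] =
        if PySem.Chars.find (text.toList.drop (m + 1)) ['}'] = -1 then -1
        else 1 + PySem.Chars.find (text.toList.drop (m + 1)) ['}'] := by
      rw [hdrop, pv_find_cons]
      simp [hgetm]
    have hffm : PySem.Chars.findFrom text.toList ['}'] (m : Int) none =
        if PySem.Chars.find (text.toList.drop m) ['}'] = -1 then -1
        else (m : Int) + PySem.Chars.find (text.toList.drop m) ['}'] :=
      PySem.Chars.findFrom_natCast text.toList ['}'] m (by omega)
    rw [hffm, hfm]
    by_cases hf : PySem.Chars.find (text.toList.drop (m + 1)) ['}'] = -1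
    · simp [hf]
    · have h1 : ¬ ((1 : Int) + PySem.Chars.find (text.toList.drop (m + 1)) ['}'] = -1) := by omega
      have h2 : ¬ ((m : Int) + (1 + PySem.Chars.find (text.toList.drop (m + 1)) ['}']) = -1) := by
        omega
      simp only [if_neg hf, if_neg h1, if_neg h2, if_neg (show ¬ ((m : Int) = -1) by omega)]
      rw [PySem.Str.slice]
      congr 3
      push_cast
      ring
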